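-- pv_equiv track=rewrite | github.com/rishigupta2004/TelemetryX | backend/api/routers/sessions.py | _cap_position_rows
-- ===== SOURCE A (Python) =====
-- def _cap_position_rows(rows: list, max_rows: int = 50000) -> list:
--     if not isinstance(rows, list) or len(rows) <= max_rows:
--         return rows or []
--     try:
--         by_driver = {}
--         for row in rows:
--             drv = int(row.get("driverNumber") or 0)
--             by_driver.setdefault(drv, []).append(row)
--         per_driver = max(500, max_rows // max(1, len(by_driver)))
--         out = []
--         for drv in sorted(by_driver.keys()):
--             bucket = by_driver[drv]
--             stride = max(1, len(bucket) // per_driver)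
--             out.extend(bucket[::stride])
--         return out[:max_rows]
--     except Exception:
--         stride = max(1, len(rows) // max_rows)
--         return rows[::stride][:max_rows]
-- ===== SOURCE B (Python) =====
-- def _cap_position_rows(rows: list, max_rows: int = 50000) -> list:
--     if not isinstance(rows, list) or len(rows) <= max_rows:
--         return rows or []
--     try:
--         pairs = [(int(row.get("driverNumber") or 0), row) for row in rows]
--         pairs.sort(key=lambda p: p[0])  # stable: within-driver order preserved
--         groups = []
--         for k, row in pairs:
--             if groups and groups[-1][0] == k:
--                 groups[-1][1].append(row)
--             else:
--                 groups.append((k, [row]))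
--         per_driver = max(500, max_rows // max(1, len(groups)))
--         out = []
--         for _, bucket in groups:
--             stride = max(1, len(bucket) // per_driver)
--             out.extend(bucket[::stride])
--         return out[:max_rows]
--     except Exception:
--         stride = max(1, len(rows) // max_rows)
--         return rows[::stride][:max_rows]
-- ===== Notes on version B (the rewrite author's own statement) =====
-- stated objective: alternative
-- what changed: B replaces A's dict-of-buckets grouping (setdefault/append then iterating sorted keys) by a stable sort of (driverKey, row) pairs followed by one scan over the contiguous per-driver runs; the stable sort preserves within-driver order, so buckets and output order are identical.
import Mathlib
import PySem

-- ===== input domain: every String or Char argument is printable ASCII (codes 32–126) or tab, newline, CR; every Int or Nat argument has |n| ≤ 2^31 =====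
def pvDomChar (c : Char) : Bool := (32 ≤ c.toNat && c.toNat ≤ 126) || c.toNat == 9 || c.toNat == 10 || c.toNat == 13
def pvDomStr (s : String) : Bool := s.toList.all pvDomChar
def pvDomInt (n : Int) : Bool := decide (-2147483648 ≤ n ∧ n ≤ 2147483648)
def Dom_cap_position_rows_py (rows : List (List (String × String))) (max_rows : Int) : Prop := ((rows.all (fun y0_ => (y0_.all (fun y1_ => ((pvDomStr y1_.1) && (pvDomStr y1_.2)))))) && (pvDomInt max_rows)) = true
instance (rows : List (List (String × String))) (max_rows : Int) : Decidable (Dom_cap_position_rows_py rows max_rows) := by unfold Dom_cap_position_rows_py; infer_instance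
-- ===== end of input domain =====

-- B replaces A's dict-of-buckets grouping by a stable sort on the driver key followed by a
-- scan over the contiguous per-driver runs (objective: alternative — a different data
-- structure/traversal of similar cost).

-- shared key extraction, `int(row.get("driverNumber") or 0)`; none = ValueError
def pvKey? (row : List (String × String)) : Option Int :=
  match (PySem.Dict.mk row).get? "driverNumber" with
  | none => some 0
  | some s => if s = "" then some 0 else PySem.Int.ofStr? s

-- shared `except` fallback (both Pythons carry the identical block):
-- stride = max(1, len(rows) // max_rows); return rows[::stride][:max_rows]
-- (floordiv? is none exactly where Python raises ZeroDivisionError; excluded by Pre_)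
def pvFallback (rows : List (List (String × String))) (max_rows : Int) : List (List (String × String)) :=
  match PySem.Int.floordiv? (PySem.List.len rows) max_rows with
  | none => []
  | some q => PySem.List.slice ((PySem.List.slice? rows none none (max 1 q)).getD []) none (some max_rows)

-- ===== PORT A =====
def cap_position_rows_py (rows : List (List (String × String))) (max_rows : Int) : List (List (String × String)) :=
  if PySem.List.len rows ≤ max_rows then (if rows.isEmpty then [] else rows)
  else
    match rows.foldl (fun acc row => acc.bind fun d =>
        (pvKey? row).map fun drv => d.modify drv [] (fun x => x ++ [row])) (some PySem.Dict.empty) with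
    | some by_driver =>
        let per_driver := max 500 (PySem.Int.floordiv max_rows (max 1 ((PySem.Dict.size by_driver : Int))))
        let out := (PySem.List.sorted by_driver.keys (fun k => k)).foldl
          (fun out drv =>
            let bucket := by_driver.getD drv []
            let stride := max 1 (PySem.Int.floordiv (PySem.List.len bucket) per_driver)
            out ++ (PySem.List.slice? bucket none none stride).getD []) []
        PySem.List.slice out none (some max_rows)
    | none => pvFallback rows max_rows

-- ===== PORT B =====
-- one step of B's run-grouping loop over the key-sorted pairs (groups[-1] is getLast?)
def pvGroupStep (gs : List (Int × List (List (String × String)))) (p : Int × List (String × String)) :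
    List (Int × List (List (String × String))) :=
  match gs.getLast? with
  | some g => if g.1 = p.1 then gs.dropLast ++ [(g.1, g.2 ++ [p.2])] else gs ++ [(p.1, [p.2])]
  | none => gs ++ [(p.1, [p.2])]

def cap_position_rows_py_alt (rows : List (List (String × String))) (max_rows : Int) : List (List (String × String)) :=
  if PySem.List.len rows ≤ max_rows then (if rows.isEmpty then [] else rows)
  else
    match rows.foldl (fun acc row => acc.bind fun ps =>
        (pvKey? row).map fun k => ps ++ [(k, row)]) (some []) with
    | some pairs =>
        let groups := (PySem.List.sorted pairs (fun p => p.1)).foldl pvGroupStep []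
        let per_driver := max 500 (PySem.Int.floordiv max_rows (max 1 ((PySem.List.len groups))))
        let out := groups.foldl
          (fun out g =>
            let stride := max 1 (PySem.Int.floordiv (PySem.List.len g.2) per_driver)
            out ++ (PySem.List.slice? g.2 none none stride).getD []) []
        PySem.List.slice out none (some max_rows)
    | none => pvFallback rows max_rows

-- ===== PRECONDITION & SPEC =====
-- Pre_ excludes only the inputs on which Python A raises ZeroDivisionError in the except
-- branch: max_rows = 0 with a nonempty rows list containing an unparsable driverNumber.
def Pre_cap_position_rows_py (rows : List (List (String × String))) (max_rows : Int) : Prop :=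
  ¬ (max_rows = 0 ∧ rows ≠ [] ∧ ∃ row ∈ rows, pvKey? row = none)
instance (rows : List (List (String × String))) (max_rows : Int) : Decidable (Pre_cap_position_rows_py rows max_rows) := by unfold Pre_cap_position_rows_py; infer_instance

def pvWitness_cap_position_rows_py : (List (List (String × String))) × Int :=
  ([[("driverNumber", "1"), ("x", "a")], [("driverNumber", "2")]], 1)

def Spec_cap_position_rows_py (rows : List (List (String × String))) (max_rows : Int) (out : List (List (String × String))) : Prop := out = cap_position_rows_py_alt rows max_rows
instance (rows : List (List (String × String))) (max_rows : Int) (out : List (List (String × String))) : Decidable (Spec_cap_position_rows_py rows max_rows out) := by unfold Spec_cap_position_rows_py; infer_instance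

-- ===== CLAIM (what is proved, stated in full; the proofs are below) =====
def Claim_equal_cap_position_rows_py : Prop := ∀ (rows : List (List (String × String))) (max_rows : Int), Dom_cap_position_rows_py rows max_rows → Pre_cap_position_rows_py rows max_rows → Spec_cap_position_rows_py rows max_rows (cap_position_rows_py rows max_rows)

-- ===== LEMMAS AND PROOFS =====

theorem pv_bind_fold_none {α β : Type} (l : List α) (F : α → β → Option β) :
    l.foldl (fun acc x => acc.bind (F x)) none = none := by
  induction l with
  | nil => rfl
  | cons x xs ih => simpa using ih

theorem pv_insertBy_nil {α : Type} (bef : α → α → Bool) (x : α) :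
    PySem.List.insertBy bef x [] = [x] := rfl

theorem pv_insertBy_cons {α : Type} (bef : α → α → Bool) (x y : α) (ys : List α) :
    PySem.List.insertBy bef x (y :: ys) =
      if bef x y then x :: y :: ys else y :: PySem.List.insertBy bef x ys := rfl

theorem pv_filter_eq_nil {α : Type} (f : α → Int) (ps : List α) (k : Int) (h : k ∉ ps.map f) :
    ps.filter (fun p => f p == k) = [] := by
  rw [List.filter_eq_nil_iff]
  intro p hp hk
  exact h (List.mem_map.mpr ⟨p, hp, by simpa using hk⟩)

theorem pv_filter_insertBy {α : Type} (f : α → Int) (x : α) (ys : List α) (k : Int)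
    (h : ys.Pairwise (fun a b => f a ≤ f b)) :
    (PySem.List.insertBy (fun a b => decide (f a < f b)) x ys).filter (fun p => f p == k)
      = if f x == k then ys.filter (fun p => f p == k) ++ [x] else ys.filter (fun p => f p == k) := by
  induction ys with
  | nil => simp [pv_insertBy_nil]; split <;> simp_all
  | cons y ys ih =>
    rw [pv_insertBy_cons]
    by_cases hlt : f x < f y
    · simp only [hlt, decide_true, if_true]
      by_cases hk : f x = k
      · have hnil : (y :: ys).filter (fun p => f p == k) = [] := by
          apply pv_filter_eq_nil
          intro hmem
          rcases List.mem_map.mp hmem with ⟨p, hp, hfp⟩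
          have hyp : f y ≤ f p := by
            rcases List.mem_cons.mp hp with h1 | h1
            · simp [h1]
            · exact (List.pairwise_cons.mp h).1 p h1
          omega
        simp [hnil, hk]
      · have hkf : (f x == k) = false := by simpa using hk
        simp [List.filter_cons, hkf]
    · simp only [hlt, decide_false, Bool.false_eq_true, if_false]
      rw [List.filter_cons, List.filter_cons, ih (List.pairwise_cons.mp h).2]
      by_cases hk : f x = k <;> by_cases hyk : f y = k <;> simp [hk, hyk]

-- stability of Python's sort: the elements with key k keep their source order
theorem pv_filter_sorted {α : Type} (f : α → Int) (ps : List α) (k : Int) :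
    (PySem.List.sorted ps f).filter (fun p => f p == k) = ps.filter (fun p => f p == k) := by
  induction ps using List.reverseRecOn with
  | nil => rfl
  | append_singleton ps x ih =>
    rw [PySem.List.sorted_eq_foldl_insertBy, List.foldl_concat, ← PySem.List.sorted_eq_foldl_insertBy]
    rw [pv_filter_insertBy f x _ k (by
      have := PySem.List.sorted_map_key_pairwise ps f
      exact (List.pairwise_map.mp this))]
    rw [List.filter_append, ih, List.filter_singleton]
    by_cases hk : f x = k
    · simp [hk]
    · have hkf : (f x == k) = false := by simpa using hk
      simp [hkf]


theorem pv_ofList_sublist (xs : List Int) : (PySem.Set.ofList xs).Sublist xs := by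
  induction xs with
  | nil => simp [PySem.Set.ofList_nil]
  | cons x xs ih =>
    rw [PySem.Set.ofList_cons]
    exact List.Sublist.cons₂ x (List.Sublist.trans (List.filter_sublist) ih)

theorem pv_ofList_pairwise_lt (xs : List Int) (h : xs.Pairwise (· ≤ ·)) :
    (PySem.Set.ofList xs).Pairwise (· < ·) := by
  have hle := h.sublist (pv_ofList_sublist xs)
  have hnd : (PySem.Set.ofList xs).Nodup := PySem.Set.nodup_ofList xs
  exact (hle.and hnd).imp (fun hab => lt_of_le_of_ne hab.1 hab.2)

theorem pv_le_getLast (l : List Int) (h : l.Pairwise (· ≤ ·)) (hne : l ≠ []) :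
    ∀ x ∈ l, x ≤ l.getLast hne := by
  induction l with
  | nil => simp
  | cons y ys ih =>
    intro x hx
    rcases List.mem_cons.mp hx with rfl | hx'
    · cases ys with
      | nil => simp
      | cons z zs =>
        rw [List.getLast_cons (by simp)]
        calc x ≤ z := (List.pairwise_cons.mp h).1 z (by simp)
        _ ≤ _ := ih (List.pairwise_cons.mp h).2 (by simp) z (by simp)
    · cases ys with
      | nil => simp at hx'
      | cons z zs =>
        rw [List.getLast_cons (by simp)]
        exact ih (List.pairwise_cons.mp h).2 (by simp) x hx'

theorem pv_groupRuns (ps : List (Int × List (String × String)))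
    (h : (ps.map (·.1)).Pairwise (· ≤ ·)) :
    ps.foldl pvGroupStep []
      = (PySem.Set.ofList (ps.map (·.1))).map
          (fun k => (k, (ps.filter (fun p => p.1 == k)).map (·.2))) := by
  induction ps using List.reverseRecOn with
  | nil => rfl
  | append_singleton ps p ih =>
    have hps : (ps.map (·.1)).Pairwise (· ≤ ·) :=
      h.sublist (List.Sublist.map _ (List.sublist_append_left ps [p]))
    rw [List.foldl_concat, ih hps]
    have hm1 : List.map (fun x => x.1) (ps ++ [p]) = List.map (fun x => x.1) ps ++ [p.1] := by simp
    rw [hm1, PySem.Set.ofList_append_singleton]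
    by_cases hmem : p.1 ∈ ps.map (·.1)
    · -- p.1 already present: it is the last key; pvGroupStep extends the last bucket
      have hne : ps.map (·.1) ≠ [] := by rintro hnil; rw [hnil] at hmem; simp at hmem
      have hone : PySem.Set.ofList (ps.map (·.1)) ≠ [] := by
        intro hnil
        have := (PySem.Set.mem_ofList (ps.map (·.1)) p.1).mpr hmem
        rw [hnil] at this; simp at this
      -- the last element of the distinct-key list is p.1
      have hlt := pv_ofList_pairwise_lt _ hps
      have hlast : (PySem.Set.ofList (ps.map (·.1))).getLast hone = p.1 := by
        apply le_antisymm
        · -- last ∈ keys, and every key ≤ p.1 by sortedness of ps ++ [p]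
          have hmem' : (PySem.Set.ofList (ps.map (·.1))).getLast hone ∈ ps.map (·.1) := by
            rw [← PySem.Set.mem_ofList]
            exact List.getLast_mem hone
          have hall : ∀ x ∈ ps.map (·.1), x ≤ p.1 := by
            intro x hx
            have := (List.pairwise_append.mp (by simpa using h)).2.2
            exact this x hx p.1 (by simp)
          exact hall _ hmem'
        · exact pv_le_getLast _ (hlt.imp le_of_lt) hone p.1
            ((PySem.Set.mem_ofList _ _).mpr hmem)
      have hadd : PySem.Set.add (PySem.Set.ofList (ps.map (·.1))) p.1
          = PySem.Set.ofList (ps.map (·.1)) :=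
        PySem.Set.add_of_mem ((PySem.Set.mem_ofList _ _).mpr hmem)
      rw [hadd]
      -- decompose the distinct key list as dropLast ++ [p.1]
      -- last key of the accumulated groups is p.1: extend the last bucket
      unfold pvGroupStep
      have hgl : (List.map (fun k => (k, List.map (fun x => x.2) (List.filter (fun p => p.1 == k) ps)))
          (PySem.Set.ofList (List.map (fun x => x.1) ps))).getLast?
          = some (p.1, List.map (fun x => x.2) (List.filter (fun q => q.1 == p.1) ps)) := by
        rw [List.getLast?_map, List.getLast?_eq_getLast hone, hlast]; rfl
      rw [hgl]
      dsimp only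
      rw [if_pos rfl]
      have hnd : (PySem.Set.ofList (List.map (fun x => x.1) ps)).Nodup := PySem.Set.nodup_ofList _
      have hnotmem : (PySem.Set.ofList (List.map (fun x => x.1) ps)).getLast hone
          ∉ (PySem.Set.ofList (List.map (fun x => x.1) ps)).dropLast := by
        have := hnd
        conv at this => rw [← List.dropLast_append_getLast hone]
        have hd := List.disjoint_of_nodup_append this
        intro hmm
        exact hd hmm (by simp)
      rw [hlast] at hnotmem
      conv_rhs => rw [← List.dropLast_append_getLast hone, hlast]
      rw [List.map_append, ← List.map_dropLast]
      congr 1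
      · -- unchanged buckets for keys other than p.1
        apply List.map_congr_left
        intro k hk
        have hkne : k ≠ p.1 := fun hq => hnotmem (hq ▸ hk)
        have hf : (p.1 == k) = false := by simpa using (Ne.symm hkne)
        simp only [List.filter_append, List.filter_singleton, hf, cond_false, List.append_nil]
      · -- the bucket of p.1 gains p
        simp only [List.map_cons, List.map_nil, List.filter_append, List.filter_singleton]
        simp
    · -- a new key: append a fresh singleton group
      unfold pvGroupStep
      have hadd : PySem.Set.add (PySem.Set.ofList (ps.map (·.1))) p.1
          = PySem.Set.ofList (ps.map (·.1)) ++ [p.1] :=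
        PySem.Set.add_of_not_mem (fun hc => hmem ((PySem.Set.mem_ofList _ _).mp hc))
      rw [hadd, List.map_append]
      have hF' : ∀ k ∈ PySem.Set.ofList (List.map (fun x => x.1) ps),
          ((fun k => (k, List.map (fun x => x.2) (List.filter (fun q => q.1 == k) (ps ++ [p])))) k)
          = ((fun k => (k, List.map (fun x => x.2) (List.filter (fun q => q.1 == k) ps))) k) := by
        intro k hk
        have hkne : p.1 ≠ k := fun hq => hmem (hq ▸ ((PySem.Set.mem_ofList _ _).mp hk))
        simp only
        rw [List.filter_append, List.filter_singleton]
        have : (p.1 == k) = false := by simpa using hkne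
        simp [this]
      rw [List.map_congr_left hF']
      cases hKS : PySem.Set.ofList (List.map (fun x => x.1) ps) with
      | nil =>
        simp
        intro a b hab hq
        exact hmem (List.mem_map.mpr ⟨(a, b), hab, by simpa using hq⟩)
      | cons k0 ks =>
        have hone : PySem.Set.ofList (List.map (fun x => x.1) ps) ≠ [] := by rw [hKS]; simp
        have hgl : (List.map (fun k => (k, List.map (fun x => x.2) (List.filter (fun q => q.1 == k) ps)))
            (PySem.Set.ofList (List.map (fun x => x.1) ps))).getLast?
            = some ((PySem.Set.ofList (List.map (fun x => x.1) ps)).getLast hone,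
                List.map (fun x => x.2) (List.filter (fun q => q.1 ==
                  (PySem.Set.ofList (List.map (fun x => x.1) ps)).getLast hone) ps)) := by
          rw [List.getLast?_map, List.getLast?_eq_getLast hone]; rfl
        have hlne : (PySem.Set.ofList (List.map (fun x => x.1) ps)).getLast hone ≠ p.1 := by
          intro hq
          apply hmem
          rw [← hq, ← PySem.Set.mem_ofList]
          exact List.getLast_mem hone
        rw [← hKS, hgl]
        dsimp only
        rw [if_neg hlne]
        simp
        intro a b hab hq
        exact hmem (List.mem_map.mpr ⟨(a, b), hab, by simpa using hq⟩)

-- the distinct keys of the stably key-sorted list = sorted(distinct keys)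
theorem pv_sorted_ofList_eq (ps : List (Int × List (String × String))) :
    PySem.Set.ofList ((PySem.List.sorted ps (fun p => p.1)).map (fun p => p.1))
      = PySem.List.sorted (PySem.Set.ofList (ps.map (fun p => p.1))) (fun k => k) := by
  have h1 : (PySem.Set.ofList ((PySem.List.sorted ps (fun p => p.1)).map (fun p => p.1))).Pairwise (· < ·) :=
    pv_ofList_pairwise_lt _ (PySem.List.sorted_map_key_pairwise ps _)
  have h2 : (PySem.List.sorted (PySem.Set.ofList (ps.map (fun p => p.1))) (fun k => k)).Pairwise (· < ·) :=
    PySem.List.sorted_ofList_pairwise_lt _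
  have hnd1 : (PySem.Set.ofList ((PySem.List.sorted ps (fun p => p.1)).map (fun p => p.1))).Nodup :=
    PySem.Set.nodup_ofList _
  have hnd2 : (PySem.List.sorted (PySem.Set.ofList (ps.map (fun p => p.1))) (fun k => k)).Nodup :=
    ((PySem.List.sorted_perm _ _ _).nodup_iff).mpr (PySem.Set.nodup_ofList _)
  have hperm := (List.perm_ext_iff_of_nodup hnd1 hnd2).mpr (by
    intro a
    rw [PySem.Set.mem_ofList, PySem.List.mem_sorted, PySem.Set.mem_ofList]
    constructor
    · rintro ha
      rcases List.mem_map.mp ha with ⟨p, hp, rfl⟩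
      exact List.mem_map.mpr ⟨p, (PySem.List.mem_sorted _ _ _ _).mp hp, rfl⟩
    · rintro ha
      rcases List.mem_map.mp ha with ⟨p, hp, rfl⟩
      exact List.mem_map.mpr ⟨p, (PySem.List.mem_sorted _ _ _ _).mpr hp, rfl⟩)
  exact List.Perm.eq_of_pairwise (fun a b _ _ hab hba => le_antisymm hab.le hba.le) h1 h2 hperm

-- A's grouping loop is the pair-collecting loop of B followed by the dict fold
theorem pv_fold_rel (rows : List (List (String × String))) :
    ∀ ps : List (Int × List (String × String)),
    rows.foldl (fun acc row => acc.bind fun d =>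
        (pvKey? row).map fun drv => d.modify drv [] (fun x => x ++ [row]))
      (some (ps.foldl (fun d p => d.modify p.1 [] (fun x => x ++ [p.2])) PySem.Dict.empty))
    = (rows.foldl (fun acc row => acc.bind fun qs =>
          (pvKey? row).map fun k => qs ++ [(k, row)]) (some ps)).map
        (fun qs => qs.foldl (fun d p => d.modify p.1 [] (fun x => x ++ [p.2])) PySem.Dict.empty) := by
  induction rows with
  | nil => intro ps; simp
  | cons row rest ih =>
    intro ps
    cases hk : pvKey? row with
    | none =>
      simp only [List.foldl_cons, Option.bind_some, hk, Option.map_none]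
      rw [pv_bind_fold_none, pv_bind_fold_none]
      rfl
    | some k =>
      simp only [List.foldl_cons, Option.bind_some, hk, Option.map_some]
      have : (ps.foldl (fun d p => d.modify p.1 [] (fun x => x ++ [p.2])) PySem.Dict.empty).modify k [] (fun x => x ++ [row])
          = (ps ++ [(k, row)]).foldl (fun d p => d.modify p.1 [] (fun x => x ++ [p.2])) PySem.Dict.empty := by
        rw [List.foldl_concat]
      rw [this, ih (ps ++ [(k, row)])]


-- ===== VERDICT (by name: the statement is the Claim_ definition above) =====
theorem cap_position_rows_py_spec : Claim_equal_cap_position_rows_py := by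
  intro rows max_rows _hdom _hpre
  unfold Spec_cap_position_rows_py
  unfold cap_position_rows_py cap_position_rows_py_alt
  by_cases hguard : PySem.List.len rows ≤ max_rows
  · rw [if_pos hguard, if_pos hguard]
  · rw [if_neg hguard, if_neg hguard]
    have hrel := pv_fold_rel rows []
    simp only [List.foldl_nil] at hrel
    cases hB : rows.foldl (fun acc row => acc.bind fun qs =>
        (pvKey? row).map fun k => qs ++ [(k, row)]) (some []) with
    | none =>
      rw [hB] at hrel
      rw [hrel]
      rfl
    | some pairs =>
      rw [hB] at hrel
      rw [hrel]
      simp only [Option.map_some]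
      -- characterize A's dict
      have hkeys : (pairs.foldl (fun d p => d.modify p.1 [] (fun x => x ++ [p.2])) PySem.Dict.empty).keys
          = PySem.Set.ofList (pairs.map (fun p => p.1)) := by
        rw [PySem.Dict.keys_foldl_modify_key pairs (fun p => p.1) [] (fun _ p => (fun x => x ++ [p.2]))]
        simp [PySem.Dict.keys_empty, PySem.Set.update_nil_left]
      have hgetD : ∀ k, (pairs.foldl (fun d p => d.modify p.1 [] (fun x => x ++ [p.2])) PySem.Dict.empty).getD k []
          = (pairs.filter (fun p => p.1 == k)).map (fun p => p.2) := by
        intro k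
        rw [PySem.Dict.getD_foldl_modify_append pairs PySem.Dict.empty k]
        simp [PySem.Dict.getD_empty]
      have hsize : ((PySem.Dict.size (pairs.foldl (fun d p => d.modify p.1 [] (fun x => x ++ [p.2])) PySem.Dict.empty) : Int))
          = ((PySem.Set.ofList (pairs.map (fun p => p.1))).length : Int) := by
        have : PySem.Dict.size (pairs.foldl (fun d p => d.modify p.1 [] (fun x => x ++ [p.2])) PySem.Dict.empty)
            = (pairs.foldl (fun d p => d.modify p.1 [] (fun x => x ++ [p.2])) PySem.Dict.empty).keys.length := by
          simp [PySem.Dict.size, PySem.Dict.keys]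
        rw [this, hkeys]
      -- characterize B's groups
      have hgroups : (PySem.List.sorted pairs (fun p => p.1)).foldl pvGroupStep []
          = (PySem.List.sorted (PySem.Set.ofList (pairs.map (fun p => p.1))) (fun k => k)).map
              (fun k => (k, (pairs.filter (fun p => p.1 == k)).map (fun p => p.2))) := by
        rw [pv_groupRuns _ (by
          have := PySem.List.sorted_map_key_pairwise pairs (fun p => p.1)
          simpa using this)]
        rw [show ((PySem.List.sorted pairs (fun p => p.1)).map (fun x => x.1))
              = ((PySem.List.sorted pairs (fun p => p.1)).map (fun p => p.1)) from rfl]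
        rw [pv_sorted_ofList_eq]
        apply List.map_congr_left
        intro k _
        rw [pv_filter_sorted (fun p => p.1) pairs k]
      rw [hgroups, hkeys, hsize]
      have hlen : PySem.List.len ((PySem.List.sorted (PySem.Set.ofList (pairs.map (fun p => p.1))) (fun k => k)).map
            (fun k => (k, (pairs.filter (fun p => p.1 == k)).map (fun p => p.2))))
          = ((PySem.Set.ofList (pairs.map (fun p => p.1))).length : Int) := by
        simp [PySem.List.len_eq, PySem.List.length_sorted]
      rw [hlen]
      congr 1
      rw [List.foldl_map]
      apply PySem.List.foldl_congr_mem
      intro acc k _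
      rw [hgetD k]
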